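-- pv_equiv track=rewrite | github.com/SimonCastroV/PFCompiladores | primeros_siguientes.py | _primeros_de_secuencia
-- ===== SOURCE A (Python) =====
-- def _primeros_de_secuencia(secuencia, primeros):
--     """
--     Devuelve FIRST de una secuencia (lista de símbolos).
--     """
--     if not secuencia:
--         return {'e'}
--
--     resultado = set()
--     for simbolo in secuencia:
--         resultado.update(primeros.get(simbolo, set()) - {'e'})
--         if 'e' not in primeros.get(simbolo, set()):
--             break
--     else:
--         resultado.add('e')
--     return resultado
-- ===== SOURCE B (Python) =====
-- def _primeros_de_secuencia(secuencia, primeros):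
--     """FIRST of a sequence via the standard recurrence FIRST(X alpha)."""
--     if not secuencia:
--         return {'e'}
--     first = primeros.get(secuencia[0], set())
--     if 'e' in first:
--         return (first - {'e'}) | _primeros_de_secuencia(secuencia[1:], primeros)
--     return first - {'e'}
-- ===== Notes on version B (the rewrite author's own statement) =====
-- stated objective: idiomatic
-- what changed: Replaces A's accumulating for-loop with break/else by the direct textbook FIRST(Xα) recurrence: head symbol's FIRST minus epsilon, unioned with the recursion on the tail only when epsilon is present.
import Mathlib
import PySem

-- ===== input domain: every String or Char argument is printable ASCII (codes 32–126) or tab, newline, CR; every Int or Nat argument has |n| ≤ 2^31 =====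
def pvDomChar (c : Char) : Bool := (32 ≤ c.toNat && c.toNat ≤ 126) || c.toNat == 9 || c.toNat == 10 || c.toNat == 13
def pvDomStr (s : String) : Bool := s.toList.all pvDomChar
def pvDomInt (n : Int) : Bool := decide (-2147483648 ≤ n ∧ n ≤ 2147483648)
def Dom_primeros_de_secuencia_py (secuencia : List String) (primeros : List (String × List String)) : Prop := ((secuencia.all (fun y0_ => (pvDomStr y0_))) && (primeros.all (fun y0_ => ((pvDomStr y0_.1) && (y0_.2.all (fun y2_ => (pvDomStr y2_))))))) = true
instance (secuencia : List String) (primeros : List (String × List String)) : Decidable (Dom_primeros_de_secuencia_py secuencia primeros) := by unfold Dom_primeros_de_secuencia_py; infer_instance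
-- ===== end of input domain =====

-- B replaces A's accumulating loop with break/else by the direct FIRST(Xα) recurrence
-- (head/tail recursion, no accumulator); objective: idiomatic, no speed claim.

-- ===== PORT A =====
-- the 'for simbolo in secuencia: … break / else: add' loop, carrying 'resultado'
def pvLoopA (primeros : List (String × List String)) : List String → List String → List String
  | [], resultado => PySem.Set.add resultado "e"          -- for/else: no break happened
  | simbolo :: rest, resultado =>
    let f := PySem.Set.ofList (PySem.Dict.getD (PySem.Dict.ofList primeros) simbolo [])
    let resultado := PySem.Set.update resultado (PySem.Set.diff f ["e"])
    if ¬ (PySem.Set.contains f "e") then resultado        -- break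
    else pvLoopA primeros rest resultado

def primeros_de_secuencia_py (secuencia : List String) (primeros : List (String × List String)) : List String :=
  if secuencia = [] then ["e"]
  else pvLoopA primeros secuencia PySem.Set.empty

-- ===== PORT B =====
def primeros_de_secuencia_py_alt (secuencia : List String) (primeros : List (String × List String)) : List String :=
  match secuencia with
  | [] => ["e"]
  | s :: rest =>
    let first := PySem.Set.ofList (PySem.Dict.getD (PySem.Dict.ofList primeros) s [])
    if PySem.Set.contains first "e" then
      PySem.Set.union (PySem.Set.diff first ["e"]) (primeros_de_secuencia_py_alt rest primeros)
    else
      PySem.Set.diff first ["e"]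

-- ===== PRECONDITION & SPEC =====
def Spec_primeros_de_secuencia_py (secuencia : List String) (primeros : List (String × List String)) (out : List String) : Prop := out = primeros_de_secuencia_py_alt secuencia primeros
instance (secuencia : List String) (primeros : List (String × List String)) (out : List String) : Decidable (Spec_primeros_de_secuencia_py secuencia primeros out) := by unfold Spec_primeros_de_secuencia_py; infer_instance

-- ===== CLAIM (what is proved, stated in full; the proofs are below) =====
def Claim_equal_primeros_de_secuencia_py : Prop := ∀ (secuencia : List String) (primeros : List (String × List String)), Dom_primeros_de_secuencia_py secuencia primeros → Spec_primeros_de_secuencia_py secuencia primeros (primeros_de_secuencia_py secuencia primeros)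

-- ===== LEMMAS AND PROOFS =====

theorem pv_update_add {α : Type} [BEq α] [LawfulBEq α] (r d : List α) (x : α) :
    PySem.Set.update r (PySem.Set.add d x) = PySem.Set.add (PySem.Set.update r d) x := by
  by_cases h : x ∈ d
  · rw [PySem.Set.add_of_mem h, PySem.Set.add_of_mem (by rw [PySem.Set.mem_update]; exact Or.inr h)]
  · rw [PySem.Set.add_of_not_mem h, PySem.Set.update_append, PySem.Set.update_cons,
        PySem.Set.update_nil]

theorem pv_update_update {α : Type} [BEq α] [LawfulBEq α] (r d t : List α) :
    PySem.Set.update (PySem.Set.update r d) t = PySem.Set.update r (PySem.Set.update d t) := by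
  induction t generalizing d with
  | nil => rw [PySem.Set.update_nil, PySem.Set.update_nil]
  | cons x t ih =>
    rw [PySem.Set.update_cons, PySem.Set.update_cons, ← pv_update_add, ih]

theorem pv_alt_nodup (secuencia : List String) (primeros : List (String × List String)) :
    (primeros_de_secuencia_py_alt secuencia primeros).Nodup := by
  induction secuencia with
  | nil => simp [primeros_de_secuencia_py_alt]
  | cons s rest ih =>
    rw [primeros_de_secuencia_py_alt]
    split
    · exact PySem.Set.nodup_union _ _ (PySem.Set.nodup_diff _ _ (PySem.Set.nodup_ofList _))
    · exact PySem.Set.nodup_diff _ _ (PySem.Set.nodup_ofList _)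

theorem pv_loopA_eq (primeros : List (String × List String)) (secuencia : List String)
    (res : List String) :
    pvLoopA primeros secuencia res
      = PySem.Set.update res (primeros_de_secuencia_py_alt secuencia primeros) := by
  induction secuencia generalizing res with
  | nil =>
    rw [pvLoopA, primeros_de_secuencia_py_alt, PySem.Set.update_cons, PySem.Set.update_nil]
  | cons s rest ih =>
    rw [pvLoopA, primeros_de_secuencia_py_alt]
    by_cases h : PySem.Set.contains (PySem.Set.ofList (PySem.Dict.getD (PySem.Dict.ofList primeros) s [])) "e" = true
    · simp only [h, not_true_eq_false, if_false, if_true, ih, PySem.Set.union,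
        pv_update_update]
    · have h' : "e" ∉ (PySem.Dict.ofList primeros).getD s [] := by
        simpa [PySem.Set.contains_iff, PySem.Set.mem_ofList] using h
      simp [h']

-- ===== VERDICT (by name: the statement is the Claim_ definition above) =====
theorem primeros_de_secuencia_py_spec : Claim_equal_primeros_de_secuencia_py := by
  intro secuencia primeros _
  unfold Spec_primeros_de_secuencia_py primeros_de_secuencia_py
  cases secuencia with
  | nil => rfl
  | cons s rest =>
    rw [if_neg (List.cons_ne_nil s rest), pv_loopA_eq]
    simp only [PySem.Set.empty, PySem.Set.update_nil_left]
    exact PySem.Set.ofList_eq_self_of_nodup _ (pv_alt_nodup _ _)
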